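-- pv_equiv track=rewrite | github.com/ymink716/PS | BOJ/BaaarkingDog/0x1B_최소 신장 트리/13418.py | solution
-- ===== SOURCE A (Python) =====
-- def solution(N, edges):
--     # 최악의 코스 초기값은 모든 코스가 내리막길(1)로 구성되어 있다고 가정
--     # 최적의 코스 초기값은 모든 코스가 오르막길(0)로 구성되어 있다고 가정
--     worst, best = 0, N
--     max_parent, min_parent = [i for i in range(N + 1)], [i for i in range(N + 1)]
--
--     def find(x, parent):  # 특정 원소가 속한 집합 찾기
--         if x != parent[x]:
--             parent[x] = find(parent[x], parent)
--         return parent[x]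
--
--     def union(a, b, parent):  # 두 원소가 속한 집합 합치기
--         a = find(a, parent)
--         b = find(b, parent)
--         if a < b:
--             parent[b] = a
--         else:
--             parent[a] = b
--
--     for a, b, w in edges:
--         if w == 1:  # 내리막길
--             if find(a, min_parent) != find(b, min_parent):  # 싸이클 발생 x
--                 best -= 1  # 최적의 코스 가중치 -1
--                 union(a, b, min_parent)
--         else:  # 오르막길
--             if find(a, max_parent) != find(b, max_parent):
--                 worst += 1  # 최악의 코스 가중치 +1
--                 union(a, b, max_parent)
--
--     return worst ** 2 - best ** 2
-- ===== SOURCE B (Python) =====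
-- def solution(N, edges):
--     # Quick-find: keep, per group, a flat array mapping each node to the smallest
--     # node of its component; a merging union relabels the larger root to the smaller.
--     worst, best = 0, N
--     rep_max = list(range(N + 1))
--     rep_min = list(range(N + 1))
--     for a, b, w in edges:
--         if w == 1:
--             ra, rb = rep_min[a], rep_min[b]
--             if ra != rb:
--                 lo, hi = (ra, rb) if ra < rb else (rb, ra)
--                 rep_min = [lo if v == hi else v for v in rep_min]
--                 best -= 1
--         else:
--             ra, rb = rep_max[a], rep_max[b]
--             if ra != rb:
--                 lo, hi = (ra, rb) if ra < rb else (rb, ra)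
--                 rep_max = [lo if v == hi else v for v in rep_max]
--                 worst += 1
--     return worst * worst - best * best
-- ===== Notes on version B (the rewrite author's own statement) =====
-- stated objective: alternative
-- what changed: Replaces A's recursive quick-union with path compression (parent-pointer forest, recursive find that mutates the array, union attaching the larger root under the smaller) by a quick-find structure: a flat label array mapping each node to the minimum of its component, where a merging union relabels every occurrence of the larger root in one whole-array scan; no pointer chasing, no recursion, no compression. The scan makes B slower than A on large N.
import Mathlib
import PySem

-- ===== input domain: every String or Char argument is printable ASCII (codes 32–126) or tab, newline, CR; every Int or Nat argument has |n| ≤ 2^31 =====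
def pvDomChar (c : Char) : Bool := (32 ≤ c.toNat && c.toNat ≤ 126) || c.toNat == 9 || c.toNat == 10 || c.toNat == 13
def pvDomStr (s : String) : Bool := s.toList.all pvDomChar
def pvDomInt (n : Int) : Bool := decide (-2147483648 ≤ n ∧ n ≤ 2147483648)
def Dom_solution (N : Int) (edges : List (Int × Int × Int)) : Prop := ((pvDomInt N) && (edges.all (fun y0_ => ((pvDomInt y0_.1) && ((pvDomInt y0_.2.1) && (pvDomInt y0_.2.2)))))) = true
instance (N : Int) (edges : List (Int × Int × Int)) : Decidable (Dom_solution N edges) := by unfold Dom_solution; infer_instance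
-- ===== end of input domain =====

-- B replaces A's recursive path-compressing union-find with a flat quick-find label
-- array relabelled on each merging union (objective: alternative; return value only).

-- ===== PORT A =====
-- A's recursive `find` with path compression; `fuel` is a port-side totality bound
-- (the Python recursion terminates because parent pointers strictly decrease).
def findA : Nat → Int → List Int → Int × List Int
  | 0, x, parent => (x, parent)
  | Nat.succ f, x, parent =>
    let px := PySem.List.pyGetD parent x 0
    if x ≠ px then
      let rp := findA f px parent
      let p2 := PySem.List.pySetD rp.2 x rp.1
      (PySem.List.pyGetD p2 x 0, p2)
    else (px, parent)

def unionA (a b : Int) (parent : List Int) : List Int :=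
  let fa := findA (parent.length + 2) a parent
  let fb := findA (fa.2.length + 2) b fa.2
  if fa.1 < fb.1 then PySem.List.pySetD fb.2 fb.1 fa.1
  else PySem.List.pySetD fb.2 fa.1 fb.1

-- the `if find(a,p) != find(b,p): union(a,b,p)` pattern of A's loop body
def groupA (a b : Int) (p : List Int) : Bool × List Int :=
  let fa := findA (p.length + 2) a p
  let fb := findA (fa.2.length + 2) b fa.2
  if fa.1 ≠ fb.1 then (true, unionA a b fb.2) else (false, fb.2)

def stepA (st : Int × Int × List Int × List Int) (e : Int × Int × Int) :
    Int × Int × List Int × List Int :=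
  if e.2.2 = 1 then
    let g := groupA e.1 e.2.1 st.2.2.2
    if g.1 then (st.1, st.2.1 - 1, st.2.2.1, g.2) else (st.1, st.2.1, st.2.2.1, g.2)
  else
    let g := groupA e.1 e.2.1 st.2.2.1
    if g.1 then (st.1 + 1, st.2.1, g.2, st.2.2.2) else (st.1, st.2.1, g.2, st.2.2.2)

def solution (N : Int) (edges : List (Int × Int × Int)) : Int :=
  let init := PySem.List.pyRange 0 (N + 1) 1
  let s := edges.foldl stepA (0, N, init, init)
  s.1 ^ 2 - s.2.1 ^ 2

-- ===== PORT B =====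
-- quick-find: read the two labels; on a merge, rewrite every `hi` label to `lo`
def groupB (a b : Int) (r : List Int) : Bool × List Int :=
  let ra := PySem.List.pyGetD r a 0
  let rb := PySem.List.pyGetD r b 0
  if ra ≠ rb then
    let lo := if ra < rb then ra else rb
    let hi := if ra < rb then rb else ra
    (true, r.map fun v => if v = hi then lo else v)
  else (false, r)

def stepB (st : Int × Int × List Int × List Int) (e : Int × Int × Int) :
    Int × Int × List Int × List Int :=
  if e.2.2 = 1 then
    let g := groupB e.1 e.2.1 st.2.2.2
    if g.1 then (st.1, st.2.1 - 1, st.2.2.1, g.2) else (st.1, st.2.1, st.2.2.1, g.2)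
  else
    let g := groupB e.1 e.2.1 st.2.2.1
    if g.1 then (st.1 + 1, st.2.1, g.2, st.2.2.2) else (st.1, st.2.1, g.2, st.2.2.2)

def solution_alt (N : Int) (edges : List (Int × Int × Int)) : Int :=
  let s := edges.foldl stepB (0, N, PySem.List.pyRange 0 (N + 1) 1, PySem.List.pyRange 0 (N + 1) 1)
  s.1 * s.1 - s.2.1 * s.2.1

-- ===== PRECONDITION & SPEC =====
-- Pre_ excludes exactly the inputs where Python A raises IndexError: an edge
-- endpoint outside the valid (possibly negative) index range of the length-(N+1)
-- parent lists.
def Pre_solution (N : Int) (edges : List (Int × Int × Int)) : Prop :=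
  ∀ e ∈ edges, (-(N + 1) ≤ e.1 ∧ e.1 < N + 1) ∧ (-(N + 1) ≤ e.2.1 ∧ e.2.1 < N + 1)
instance (N : Int) (edges : List (Int × Int × Int)) : Decidable (Pre_solution N edges) := by
  unfold Pre_solution; infer_instance

def pvWitness_solution : Int × (List (Int × Int × Int)) := (3, [(0, 1, 1), (1, 2, 0), (-1, 2, 1)])

def Spec_solution (N : Int) (edges : List (Int × Int × Int)) (out : Int) : Prop := out = solution_alt N edges
instance (N : Int) (edges : List (Int × Int × Int)) (out : Int) : Decidable (Spec_solution N edges out) := by unfold Spec_solution; infer_instance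

-- ===== CLAIM (what is proved, stated in full; the proofs are below) =====
def Claim_equal_solution : Prop := ∀ (N : Int) (edges : List (Int × Int × Int)), Dom_solution N edges → Pre_solution N edges → Spec_solution N edges (solution N edges)

-- ===== LEMMAS AND PROOFS =====

-- the index a Python int index denotes in a list of length n (valid range assumed)
def nrm (n : Nat) (i : Int) : Nat := if 0 ≤ i then i.toNat else n - (-i).toNat

-- representative reached by chasing parent pointers (they strictly decrease under WF)
def root (p : List Int) (i : Nat) : Nat :=
  if h : (p.getD i 0).toNat < i then root p (p.getD i 0).toNat else i
termination_by i

-- invariant of A's parent arrays: every entry points weakly downwards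
def WF (p : List Int) : Prop := ∀ i < p.length, 0 ≤ p.getD i 0 ∧ p.getD i 0 ≤ (i : Int)

-- B's label array tabulates A's root function
def RelAB (p r : List Int) : Prop :=
  r.length = p.length ∧ ∀ i < p.length, r.getD i 0 = (root p i : Int)

theorem root_of_fix (p : List Int) (i : Nat) (h : p.getD i 0 = (i : Int)) : root p i = i := by
  rw [root]
  simp only [List.getD] at h
  simp [h]

theorem root_le (p : List Int) (i : Nat) : root p i ≤ i := by
  induction i using Nat.strong_induction_on with
  | _ i ih =>
    rw [root]
    split
    · exact le_trans (ih _ ‹_›) (Nat.le_of_lt ‹_›)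
    · exact le_refl i

theorem root_fix (p : List Int) (hwf : WF p) (i : Nat) (hi : i < p.length) :
    root p i < p.length ∧ p.getD (root p i) 0 = (root p i : Int) := by
  induction i using Nat.strong_induction_on with
  | _ i ih =>
    rw [root]
    split
    · exact ih _ ‹_› (Nat.lt_trans ‹_› hi)
    · refine ⟨hi, ?_⟩
      obtain ⟨h0, h1⟩ := hwf i hi
      omega

theorem root_getD (p : List Int) (hwf : WF p) (i : Nat) (hi : i < p.length) :
    root p ((p.getD i 0).toNat) = root p i := by
  conv_rhs => rw [root]
  split
  · rfl
  · obtain ⟨h0, h1⟩ := hwf i hi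
    have hfix : p.getD i 0 = (i : Int) := by omega
    rw [show (p.getD i 0).toNat = i by omega]
    exact root_of_fix p i hfix

theorem getD_set_self (p : List Int) (j : Nat) (hj : j < p.length) (v : Int) :
    (p.set j v).getD j 0 = v := by
  simp [List.getD, hj]

theorem getD_set_ne (p : List Int) (j i : Nat) (hij : i ≠ j) (v : Int) :
    (p.set j v).getD i 0 = p.getD i 0 := by
  simp [List.getD, Ne.symm hij]

theorem wf_set (p : List Int) (hwf : WF p) (j w : Nat) (hj : j < p.length) (hw : w ≤ j) :
    WF (p.set j (w : Int)) := by
  intro i hi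
  rw [List.length_set] at hi
  by_cases hij : i = j
  · subst hij
    rw [getD_set_self p i hj]
    omega
  · rw [getD_set_ne p j i hij]
    exact hwf i hi

theorem root_set (p : List Int) (j w : Nat) (hj : j < p.length)
    (hfix : p.getD w 0 = (w : Int)) (hwle : w ≤ j)
    (hro : root p j = j ∨ w = root p j) :
    ∀ i, root (p.set j (w : Int)) i = if root p i = j then w else root p i := by
  intro i
  induction i using Nat.strong_induction_on with
  | _ i ih =>
    by_cases hij : i = j
    · subst hij
      have hgw : (p.set i (w : Int)).getD i 0 = (w : Int) := getD_set_self p i hj w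
      conv_lhs => rw [root]
      simp only [hgw, Int.toNat_natCast]
      split
      · -- w < i
        rename_i hwlt
        have hwne : w ≠ i := Nat.ne_of_lt hwlt
        have hfix' : (p.set i (w : Int)).getD w 0 = (w : Int) := by
          rw [getD_set_ne p i w hwne]; exact hfix
        rw [root_of_fix _ _ hfix']
        have hrw : root p w = w := root_of_fix p w hfix
        rcases hro with h | h
        · rw [if_pos h]
        · rw [← h]
          split <;> rfl
      · -- ¬ w < i, so w = i
        have hwi : w = i := by omega
        rcases hro with h | h
        · rw [if_pos h]; omega
        · have : root p i = i := by omega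
          rw [if_pos this]; omega
    · have hg : (p.set j (w : Int)).getD i 0 = p.getD i 0 := getD_set_ne p j i hij w
      conv_lhs => rw [root]
      simp only [hg]
      split
      · rename_i h
        have hr : root p i = root p (p.getD i 0).toNat := by rw [root, dif_pos h]
        rw [hr]
        exact ih _ h
      · rename_i h
        have hr : root p i = i := by rw [root, dif_neg h]
        rw [hr, if_neg hij]

theorem root_stop (p : List Int) (i : Nat) : ¬ ((p.getD (root p i) 0).toNat < root p i) := by
  induction i using Nat.strong_induction_on with
  | _ i ih =>
    by_cases h : (p.getD i 0).toNat < i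
    · rw [root, dif_pos h]; exact ih _ h
    · rw [root, dif_neg h]; exact h

theorem root_idem (p : List Int) (i : Nat) : root p (root p i) = root p i := by
  rw [root, dif_neg (root_stop p i)]

theorem findA_spec_nonneg (x : Int) (p : List Int) (hwf : WF p) (hx0 : 0 ≤ x)
    (hx : x < (p.length : Int)) :
    ∀ fuel, x.toNat < fuel →
      (findA fuel x p).1 = (root p x.toNat : Int) ∧
      (findA fuel x p).2.length = p.length ∧ WF (findA fuel x p).2 ∧
      ∀ i, root (findA fuel x p).2 i = root p i := by
  intro fuel
  induction fuel generalizing x p with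
  | zero => omega
  | succ f ihf =>
    intro hfuel
    have hget : PySem.List.pyGetD p x 0 = p.getD x.toNat 0 :=
      PySem.List.pyGetD_of_nonneg p 0 hx0
    have hjlt : x.toNat < p.length := by omega
    obtain ⟨h0, h1⟩ := hwf x.toNat hjlt
    simp only [findA]
    by_cases hxe : x = PySem.List.pyGetD p x 0
    · rw [if_neg (by simpa using hxe)]
      have hfix : p.getD x.toNat 0 = (x.toNat : Int) := by
        rw [← hget, ← hxe]; omega
      refine ⟨?_, rfl, hwf, fun i => rfl⟩
      show PySem.List.pyGetD p x 0 = (root p x.toNat : Int)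
      rw [root_of_fix p _ hfix, hget, hfix]
    · rw [if_pos (by simpa using hxe)]
      have hpx0 : 0 ≤ PySem.List.pyGetD p x 0 := by rw [hget]; exact h0
      have hpxlt : PySem.List.pyGetD p x 0 < (p.length : Int) := by
        rw [hget]; omega
      have hlt : (PySem.List.pyGetD p x 0).toNat < f := by
        rw [hget]; rw [hget] at hxe; omega
      obtain ⟨ih1, ih2, ih3, ih4⟩ := ihf (PySem.List.pyGetD p x 0) p hwf hpx0 hpxlt hlt
      -- notation
      have hw : root p (PySem.List.pyGetD p x 0).toNat = root p x.toNat := by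
        rw [hget]; exact root_getD p hwf x.toNat hjlt
      have hjlt2 : x.toNat < (findA f (PySem.List.pyGetD p x 0) p).2.length := by
        rw [ih2]; exact hjlt
      have hroots : root (findA f (PySem.List.pyGetD p x 0) p).2 x.toNat = root p x.toNat :=
        ih4 x.toNat
      have hset : PySem.List.pySetD (findA f (PySem.List.pyGetD p x 0) p).2 x
          (findA f (PySem.List.pyGetD p x 0) p).1 =
          (findA f (PySem.List.pyGetD p x 0) p).2.set x.toNat (root p x.toNat : Int) := by
        rw [PySem.List.pySetD_of_nonneg _ _ hx0, ih1, hw]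
      have hfix2 : (findA f (PySem.List.pyGetD p x 0) p).2.getD (root p x.toNat) 0 =
          ((root p x.toNat : Nat) : Int) := by
        have := (root_fix _ ih3 x.toNat hjlt2).2
        rw [hroots] at this; exact this
      have hro : root p x.toNat = root (findA f (PySem.List.pyGetD p x 0) p).2 x.toNat :=
        hroots.symm
      have hrs := root_set (findA f (PySem.List.pyGetD p x 0) p).2 x.toNat (root p x.toNat)
        hjlt2 hfix2 (root_le p x.toNat) (Or.inr hro)
      simp only []
      refine ⟨?_, ?_, ?_, ?_⟩
      · rw [hset, PySem.List.pyGetD_of_nonneg _ _ hx0,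
          getD_set_self _ _ hjlt2]
      · rw [hset, List.length_set, ih2]
      · rw [hset]
        exact wf_set _ ih3 x.toNat (root p x.toNat) hjlt2 (root_le p x.toNat)
      · intro i
        rw [hset]
        rw [hrs i, ih4 i]
        by_cases hc : root p i = x.toNat
        · rw [if_pos hc, ← hc, root_idem]
        · rw [if_neg hc]

theorem pyGetD_neg (l : List Int) (x : Int) (d : Int) (h1 : -(l.length : Int) ≤ x)
    (h2 : x < 0) : PySem.List.pyGetD l x d = l.getD (l.length - (-x).toNat) d := by
  unfold PySem.List.pyGetD PySem.List.pyGet? PySem.List.pyIdx?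
  rw [if_neg (by omega), if_pos h1]
  simp [List.getD]

theorem pySetD_neg (l : List Int) (x : Int) (v : Int) (h1 : -(l.length : Int) ≤ x)
    (h2 : x < 0) : PySem.List.pySetD l x v = l.set (l.length - (-x).toNat) v := by
  unfold PySem.List.pySetD PySem.List.pySet? PySem.List.pyIdx?
  rw [if_neg (by omega), if_pos h1]
  simp

theorem findA_succ (f : Nat) (x : Int) (p : List Int) :
    findA (f + 1) x p =
      (if x ≠ PySem.List.pyGetD p x 0 then
        (PySem.List.pyGetD (PySem.List.pySetD (findA f (PySem.List.pyGetD p x 0) p).2 x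
            (findA f (PySem.List.pyGetD p x 0) p).1) x 0,
          PySem.List.pySetD (findA f (PySem.List.pyGetD p x 0) p).2 x
            (findA f (PySem.List.pyGetD p x 0) p).1)
      else (PySem.List.pyGetD p x 0, p)) := rfl

theorem findA_full (p : List Int) (hwf : WF p) (x : Int)
    (h1 : -(p.length : Int) ≤ x) (h2 : x < (p.length : Int)) :
    (findA (p.length + 2) x p).1 = (root p (nrm p.length x) : Int) ∧
    (findA (p.length + 2) x p).2.length = p.length ∧ WF (findA (p.length + 2) x p).2 ∧
    ∀ i, root (findA (p.length + 2) x p).2 i = root p i := by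
  by_cases hx0 : 0 ≤ x
  · have h := findA_spec_nonneg x p hwf hx0 h2 (p.length + 2) (by omega)
    simpa [nrm, hx0] using h
  · have hxneg : x < 0 := by omega
    have hn : 0 < p.length := by omega
    have hjn : nrm p.length x = p.length - (-x).toNat := by simp [nrm, hx0]
    have hjlt : nrm p.length x < p.length := by rw [hjn]; omega
    have hget : PySem.List.pyGetD p x 0 = p.getD (nrm p.length x) 0 := by
      rw [hjn]; exact pyGetD_neg p x 0 h1 hxneg
    obtain ⟨h0, hle⟩ := hwf (nrm p.length x) hjlt
    have hxe : x ≠ PySem.List.pyGetD p x 0 := by rw [hget]; omega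
    rw [show p.length + 2 = (p.length + 1) + 1 from rfl, findA_succ,
      if_pos (by simpa using hxe)]
    have hpx0 : 0 ≤ PySem.List.pyGetD p x 0 := by rw [hget]; exact h0
    have hpxlt : PySem.List.pyGetD p x 0 < (p.length : Int) := by rw [hget]; omega
    have hlt : (PySem.List.pyGetD p x 0).toNat < p.length + 1 := by rw [hget]; omega
    obtain ⟨ih1, ih2, ih3, ih4⟩ := findA_spec_nonneg (PySem.List.pyGetD p x 0) p hwf
      hpx0 hpxlt (p.length + 1) hlt
    have hw : root p (PySem.List.pyGetD p x 0).toNat = root p (nrm p.length x) := by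
      rw [hget]; exact root_getD p hwf _ hjlt
    have hjlt2 : nrm p.length x < (findA (p.length + 1) (PySem.List.pyGetD p x 0) p).2.length := by
      rw [ih2]; exact hjlt
    have hroots : root (findA (p.length + 1) (PySem.List.pyGetD p x 0) p).2 (nrm p.length x)
        = root p (nrm p.length x) := ih4 _
    have hset : PySem.List.pySetD (findA (p.length + 1) (PySem.List.pyGetD p x 0) p).2 x
        (findA (p.length + 1) (PySem.List.pyGetD p x 0) p).1 =
        (findA (p.length + 1) (PySem.List.pyGetD p x 0) p).2.set (nrm p.length x)
          (root p (nrm p.length x) : Int) := by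
      rw [pySetD_neg _ x _ (by rw [ih2]; exact h1) hxneg, ih1, hw, ih2, ← hjn]
    have hfix2 : (findA (p.length + 1) (PySem.List.pyGetD p x 0) p).2.getD
        (root p (nrm p.length x)) 0 = ((root p (nrm p.length x) : Nat) : Int) := by
      have := (root_fix _ ih3 (nrm p.length x) hjlt2).2
      rw [hroots] at this; exact this
    have hrs := root_set (findA (p.length + 1) (PySem.List.pyGetD p x 0) p).2
      (nrm p.length x) (root p (nrm p.length x)) hjlt2 hfix2 (root_le p _) (Or.inr hroots.symm)
    refine ⟨?_, ?_, ?_, ?_⟩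
    · rw [hset, pyGetD_neg _ x _ (by rw [List.length_set, ih2]; exact h1) hxneg,
        List.length_set, ih2, ← hjn, getD_set_self _ _ hjlt2]
    · rw [hset, List.length_set, ih2]
    · rw [hset]
      exact wf_set _ ih3 (nrm p.length x) (root p (nrm p.length x)) hjlt2 (root_le p _)
    · intro i
      rw [hset, hrs i, ih4 i]
      by_cases hc : root p i = nrm p.length x
      · rw [if_pos hc, ← hc, root_idem]
      · rw [if_neg hc]

theorem nrm_lt (n : Nat) (x : Int) (h1 : -(n : Int) ≤ x) (h2 : x < n) : nrm n x < n := by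
  unfold nrm; split <;> omega

theorem pyGetD_nrm (l : List Int) (x : Int) (d : Int) (h1 : -(l.length : Int) ≤ x)
    (h2 : x < (l.length : Int)) :
    PySem.List.pyGetD l x d = l.getD (nrm l.length x) d := by
  by_cases hx0 : 0 ≤ x
  · rw [PySem.List.pyGetD_of_nonneg l d hx0]; simp [nrm, hx0]
  · rw [pyGetD_neg l x d h1 (by omega)]; simp [nrm, hx0]

theorem relab_transport (p q r : List Int) (h : RelAB p r) (hlen : q.length = p.length)
    (hroots : ∀ i, root q i = root p i) : RelAB q r := by
  refine ⟨by rw [h.1, hlen], fun i hi => ?_⟩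
  rw [hroots]
  exact h.2 i (by omega)

theorem getD_map_lt (r : List Int) (f : Int → Int) (i : Nat) (hi : i < r.length) :
    (r.map f).getD i 0 = f (r.getD i 0) := by
  simp [List.getD, List.getElem?_map, List.getElem?_eq_getElem hi]

theorem merge_spec (q r : List Int) (hq : WF q) (hrel : RelAB q r) (lo hi : Nat)
    (hlthi : lo < hi) (hhi : hi < q.length)
    (hfixlo : q.getD lo 0 = (lo : Int)) (hfixhi : root q hi = hi) :
    (q.set hi (lo : Int)).length = q.length ∧ WF (q.set hi (lo : Int)) ∧
    RelAB (q.set hi (lo : Int)) (r.map fun v => if v = (hi : Int) then (lo : Int) else v) := by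
  have hrs := root_set q hi lo hhi hfixlo (Nat.le_of_lt hlthi) (Or.inl hfixhi)
  refine ⟨List.length_set, wf_set q hq hi lo hhi (Nat.le_of_lt hlthi), ?_, ?_⟩
  · rw [List.length_map, List.length_set, hrel.1]
  · intro i hi2
    rw [List.length_set] at hi2
    rw [getD_map_lt r _ i (by rw [hrel.1]; exact hi2), hrel.2 i hi2, hrs i]
    by_cases hc : root q i = hi
    · rw [if_pos (by exact_mod_cast hc), if_pos hc]
    · rw [if_neg (by exact_mod_cast hc), if_neg hc]

theorem group_spec (p r : List Int) (a b : Int) (hwf : WF p) (hrel : RelAB p r)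
    (ha1 : -(p.length : Int) ≤ a) (ha2 : a < (p.length : Int))
    (hb1 : -(p.length : Int) ≤ b) (hb2 : b < (p.length : Int)) :
    (groupA a b p).1 = (groupB a b r).1 ∧ (groupA a b p).2.length = p.length ∧
    WF (groupA a b p).2 ∧ RelAB (groupA a b p).2 (groupB a b r).2 := by
  obtain ⟨fa1, fa2, fa3, fa4⟩ := findA_full p hwf a ha1 ha2
  set q1 := (findA (p.length + 2) a p).2 with hq1
  obtain ⟨fb1, fb2, fb3, fb4⟩ := findA_full q1 fa3 b (by rw [fa2]; exact hb1) (by rw [fa2]; exact hb2)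
  set q2 := (findA (q1.length + 2) b q1).2 with hq2
  have hq2len : q2.length = p.length := by rw [fb2, fa2]
  have hq2wf : WF q2 := fb3
  have hq2roots : ∀ i, root q2 i = root p i := fun i => by rw [fb4 i, fa4 i]
  set ra := root p (nrm p.length a) with hra
  set rb := root p (nrm p.length b) with hrb
  have hfb1 : (findA (q1.length + 2) b q1).1 = (rb : Int) := by
    rw [fb1, fa2]
    congr 1
    rw [fa4]
  have hrel2 : RelAB q2 r := relab_transport p q2 r hrel hq2len hq2roots
  have hBa : PySem.List.pyGetD r a 0 = (ra : Int) := by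
    rw [pyGetD_nrm r a 0 (by rw [hrel.1]; exact ha1) (by rw [hrel.1]; exact ha2), hrel.1,
      hrel.2 _ (nrm_lt _ _ ha1 ha2)]
  have hBb : PySem.List.pyGetD r b 0 = (rb : Int) := by
    rw [pyGetD_nrm r b 0 (by rw [hrel.1]; exact hb1) (by rw [hrel.1]; exact hb2), hrel.1,
      hrel.2 _ (nrm_lt _ _ hb1 hb2)]
  -- roots are fixpoints of q2 and below the length
  have hralt : ra < p.length ∧ q2.getD ra 0 = (ra : Int) := by
    have h := root_fix q2 hq2wf (nrm p.length a) (by rw [hq2len]; exact nrm_lt _ _ ha1 ha2)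
    rw [hq2roots, ← hra, hq2len] at h
    exact h
  have hrblt : rb < p.length ∧ q2.getD rb 0 = (rb : Int) := by
    have h := root_fix q2 hq2wf (nrm p.length b) (by rw [hq2len]; exact nrm_lt _ _ hb1 hb2)
    rw [hq2roots, ← hrb, hq2len] at h
    exact h
  have hrootra : root q2 ra = ra := root_of_fix q2 ra hralt.2
  have hrootrb : root q2 rb = rb := root_of_fix q2 rb hrblt.2
  simp only [groupA, groupB, ← hq1, ← hq2, fa1, hfb1, hBa, hBb]
  by_cases hne : ra = rb
  · rw [if_neg (by simp [hne]), if_neg (by simp [hne])]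
    exact ⟨rfl, hq2len, hq2wf, hrel2⟩
  · rw [if_pos (by simpa using hne), if_pos (by simpa using hne)]
    refine ⟨rfl, ?_⟩
    -- the union recomputes both finds on q2, with the same roots
    unfold unionA
    simp only []
    obtain ⟨ga1, ga2, ga3, ga4⟩ := findA_full q2 hq2wf a (by rw [hq2len]; exact ha1)
      (by rw [hq2len]; exact ha2)
    set q3 := (findA (q2.length + 2) a q2).2 with hq3
    obtain ⟨gb1, gb2, gb3, gb4⟩ := findA_full q3 ga3 b (by rw [ga2, hq2len]; exact hb1)
      (by rw [ga2, hq2len]; exact hb2)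
    set q4 := (findA (q3.length + 2) b q3).2 with hq4
    have hga1 : (findA (q2.length + 2) a q2).1 = (ra : Int) := by
      rw [ga1]
      congr 1
      rw [hq2len, hq2roots]
    have hgb1 : (findA (q3.length + 2) b q3).1 = (rb : Int) := by
      rw [gb1, ga2, hq2len]
      congr 1
      rw [ga4, hq2roots]
    have hroots4 : ∀ i, root q4 i = root p i := fun i => by rw [gb4, ga4, hq2roots]
    have hlen4 : q4.length = p.length := by rw [gb2, ga2, hq2len]
    have hwf4 : WF q4 := gb3
    have hrel4 : RelAB q4 r := relab_transport p q4 r hrel hlen4 hroots4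
    have hfa4 : ra < p.length ∧ q4.getD ra 0 = (ra : Int) := by
      have h := root_fix q4 hwf4 (nrm p.length a) (by rw [hlen4]; exact nrm_lt _ _ ha1 ha2)
      rw [hroots4, ← hra, hlen4] at h
      exact h
    have hfb4 : rb < p.length ∧ q4.getD rb 0 = (rb : Int) := by
      have h := root_fix q4 hwf4 (nrm p.length b) (by rw [hlen4]; exact nrm_lt _ _ hb1 hb2)
      rw [hroots4, ← hrb, hlen4] at h
      exact h
    rw [hga1, hgb1]
    by_cases hlt : ra < rb
    · have hcast : ((ra : Int) < (rb : Int)) := by exact_mod_cast hlt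
      simp only [if_pos hcast]
      rw [PySem.List.pySetD_of_nonneg _ _ (Int.natCast_nonneg rb), Int.toNat_natCast]
      obtain ⟨m1, m2, m3⟩ := merge_spec q4 r hwf4 hrel4 ra rb hlt (by rw [hlen4]; exact hfb4.1)
        hfa4.2 (root_of_fix q4 rb hfb4.2)
      exact ⟨by rw [m1, hlen4], m2, m3⟩
    · have hlt' : rb < ra := by omega
      have hcast : ¬ ((ra : Int) < (rb : Int)) := by exact_mod_cast hlt
      simp only [if_neg hcast]
      rw [PySem.List.pySetD_of_nonneg _ _ (Int.natCast_nonneg ra), Int.toNat_natCast]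
      obtain ⟨m1, m2, m3⟩ := merge_spec q4 r hwf4 hrel4 rb ra hlt' (by rw [hlen4]; exact hfa4.1)
        hfb4.2 (root_of_fix q4 ra hfa4.2)
      exact ⟨by rw [m1, hlen4], m2, m3⟩

theorem init_len (N : Int) : (PySem.List.pyRange 0 (N + 1) 1).length = (N + 1).toNat := by
  rw [PySem.List.pyRange_one]
  simp

theorem init_getD (N : Int) (i : Nat) (hi : i < (N + 1).toNat) :
    (PySem.List.pyRange 0 (N + 1) 1).getD i 0 = (i : Int) := by
  rw [PySem.List.pyRange_one]
  simp [List.getD, hi]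

theorem init_spec (N : Int) :
    (PySem.List.pyRange 0 (N + 1) 1).length = (N + 1).toNat ∧
    WF (PySem.List.pyRange 0 (N + 1) 1) ∧
    RelAB (PySem.List.pyRange 0 (N + 1) 1) (PySem.List.pyRange 0 (N + 1) 1) := by
  refine ⟨init_len N, fun i hi => ?_, rfl, fun i hi => ?_⟩
  · rw [init_getD N i (by rw [← init_len N]; exact hi)]
    omega
  · rw [init_getD N i (by rw [← init_len N]; exact hi),
      root_of_fix _ _ (init_getD N i (by rw [← init_len N]; exact hi))]

theorem loop_spec (N : Int) (es : List (Int × Int × Int))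
    (hpre : ∀ e ∈ es, (-(N + 1) ≤ e.1 ∧ e.1 < N + 1) ∧ (-(N + 1) ≤ e.2.1 ∧ e.2.1 < N + 1)) :
    ∀ (worst best : Int) (pmax pmin rmax rmin : List Int),
      pmax.length = (N + 1).toNat → pmin.length = (N + 1).toNat →
      WF pmax → WF pmin → RelAB pmax rmax → RelAB pmin rmin →
      (es.foldl stepA (worst, best, pmax, pmin)).1 = (es.foldl stepB (worst, best, rmax, rmin)).1 ∧
      (es.foldl stepA (worst, best, pmax, pmin)).2.1 = (es.foldl stepB (worst, best, rmax, rmin)).2.1 := by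
  induction es with
  | nil => intro worst best pmax pmin rmax rmin _ _ _ _ _ _; exact ⟨rfl, rfl⟩
  | cons e es ih =>
    intro worst best pmax pmin rmax rmin hlmax hlmin hwmax hwmin hrmax hrmin
    obtain ⟨⟨he1, he2⟩, he3, he4⟩ := hpre e (List.mem_cons_self)
    have hpre' : ∀ e' ∈ es, (-(N + 1) ≤ e'.1 ∧ e'.1 < N + 1) ∧
        (-(N + 1) ≤ e'.2.1 ∧ e'.2.1 < N + 1) := fun e' he' => hpre e' (List.mem_cons_of_mem e he')
    have hcast : ((N + 1).toNat : Int) = N + 1 := by omega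
    simp only [List.foldl_cons]
    by_cases hw : e.2.2 = 1
    · obtain ⟨g1, g2, g3, g4⟩ := group_spec pmin rmin e.1 e.2.1 hwmin hrmin
        (by rw [hlmin, hcast]; exact he1) (by rw [hlmin, hcast]; exact he2)
        (by rw [hlmin, hcast]; exact he3) (by rw [hlmin, hcast]; exact he4)
      simp only [stepA, stepB, if_pos hw, ← g1]
      cases hgb : (groupA e.1 e.2.1 pmin).1 <;> simp only [Bool.false_eq_true, if_false, if_true] <;>
        exact ih hpre' _ _ _ _ _ _ hlmax (by rw [g2, hlmin]) hwmax g3 hrmax g4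
    · obtain ⟨g1, g2, g3, g4⟩ := group_spec pmax rmax e.1 e.2.1 hwmax hrmax
        (by rw [hlmax, hcast]; exact he1) (by rw [hlmax, hcast]; exact he2)
        (by rw [hlmax, hcast]; exact he3) (by rw [hlmax, hcast]; exact he4)
      simp only [stepA, stepB, if_neg hw, ← g1]
      cases hgb : (groupA e.1 e.2.1 pmax).1 <;> simp only [Bool.false_eq_true, if_false, if_true] <;>
        exact ih hpre' _ _ _ _ _ _ (by rw [g2, hlmax]) hlmin g3 hwmin g4 hrmin


-- ===== VERDICT (by name: the statement is the Claim_ definition above) =====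
theorem solution_spec : Claim_equal_solution := by
  intro N edges _ hpre
  unfold Spec_solution
  simp only [solution, solution_alt]
  obtain ⟨hlen, hwf, hrel⟩ := init_spec N
  obtain ⟨h1, h2⟩ := loop_spec N edges hpre 0 N _ _ _ _ hlen hlen hwf hwf hrel hrel
  rw [h1, h2]; ring
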